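-- pv_equiv track=rewrite | github.com/2024-pass-backend/algorithm | Week4/공통/디펜스게임/suhyun2.py | solution
-- ===== SOURCE A (Python) =====
-- from queue import PriorityQueue
--
-- def solution(n, k, enemy):
--     answer = 0
--     pq = PriorityQueue()
--
--     for e in enemy:
--         if k > 0:
--             pq.put(e)
--             k -= 1
--         else:
--             # 현재의 적
--             num = e
--
--             if pq.queue[0] < num:
--                 num = pq.get()
--                 pq.put(e)
--
--             if n >= num:
--                 n -= num
--             else:
--                 break
--         answer += 1
--     return answer
-- ===== SOURCE B (Python) =====
-- def solution(n, k, enemy):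
--     # Stateless re-implementation: round r is reachable iff the cost of the
--     # cheapest way to pay for the first r enemies (use the k abilities on the
--     # k largest) fits in n; scan for the first unreachable round.
--     def feasible(r):
--         if r <= k:
--             return True
--         p = sorted(enemy[:r])
--         return sum(p[:r - k]) <= n
--     r = 0
--     while r < len(enemy) and feasible(r + 1):
--         r += 1
--     return r
-- ===== Notes on version B (the rewrite author's own statement) =====
-- stated objective: alternative
-- what changed: Replaces the incremental min-heap greedy with running budget by a stateless closed-form feasibility predicate (sum of the r-k smallest of the first r enemies <= n, computed by sorting the prefix from scratch) scanned for the first failing round.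
import Mathlib
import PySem

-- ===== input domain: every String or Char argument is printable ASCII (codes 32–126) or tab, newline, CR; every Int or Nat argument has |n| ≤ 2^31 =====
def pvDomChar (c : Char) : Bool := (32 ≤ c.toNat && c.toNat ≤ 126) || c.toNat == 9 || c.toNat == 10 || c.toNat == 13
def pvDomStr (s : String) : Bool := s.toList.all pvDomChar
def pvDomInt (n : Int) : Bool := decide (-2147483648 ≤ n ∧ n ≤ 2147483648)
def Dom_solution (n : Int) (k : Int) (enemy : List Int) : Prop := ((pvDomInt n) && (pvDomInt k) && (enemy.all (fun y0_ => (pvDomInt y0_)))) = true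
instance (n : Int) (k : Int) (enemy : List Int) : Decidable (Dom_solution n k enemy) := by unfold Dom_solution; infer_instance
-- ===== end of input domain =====

-- B replaces A's incremental min-heap greedy (running budget) by a stateless per-round
-- feasibility predicate computed by sorting each prefix from scratch; alternative, not faster.


-- ===== PORT A =====
-- PriorityQueue of ints modelled exactly by its contract: an ascending sorted list;
-- put = sorted insert, queue[0] = head (the minimum), get = pop head.
def pqPut (x : Int) : List Int → List Int
  | [] => [x]
  | y :: ys => if x ≤ y then x :: y :: ys else y :: pqPut x ys

def solGo (n k : Int) (h : List Int) (ans : Int) : List Int → Int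
  | [] => ans
  | e :: rest =>
    if 0 < k then
      solGo n (k - 1) (pqPut e h) (ans + 1) rest
    else
      match h with
      | [] => ans  -- Python raises IndexError here (pq.queue[0]); excluded by Pre_solution
      | m :: t =>
        if m < e then
          -- num = pq.get(); pq.put(e)
          if n ≥ m then solGo (n - m) k (pqPut e t) (ans + 1) rest else ans
        else
          if n ≥ e then solGo (n - e) k (m :: t) (ans + 1) rest else ans

def solution (n : Int) (k : Int) (enemy : List Int) : Int := solGo n k [] 0 enemy

-- ===== PORT B =====
-- feasible(r) of Source B; enemy[:r] and p[:r-k] are slices with nonnegative bounds = take (exact there)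
def feasibleB (n k : Int) (enemy : List Int) (r : Nat) : Bool :=
  if (r : Int) ≤ k then true
  else
    let p := PySem.List.sorted (enemy.take r) (fun x => x) false
    decide ((p.take (((r : Int) - k).toNat)).sum ≤ n)

-- Source B's while loop; fuel = enemy.length bounds the iteration count (r grows to at most len(enemy))
def solAltGo (n k : Int) (enemy : List Int) (r : Nat) : Nat → Int
  | 0 => (r : Int)
  | fuel + 1 =>
    if r < enemy.length ∧ feasibleB n k enemy (r + 1) = true then
      solAltGo n k enemy (r + 1) fuel
    else (r : Int)

def solution_alt (n : Int) (k : Int) (enemy : List Int) : Int :=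
  solAltGo n k enemy 0 enemy.length

-- ===== PRECONDITION & SPEC =====
-- A raises IndexError (pq.queue[0] on an empty heap) exactly when enemy ≠ [] and k ≤ 0; nothing else is excluded.
def Pre_solution (n : Int) (k : Int) (enemy : List Int) : Prop := enemy = [] ∨ 1 ≤ k
instance (n : Int) (k : Int) (enemy : List Int) : Decidable (Pre_solution n k enemy) := by unfold Pre_solution; infer_instance
def pvWitness_solution : Int × Int × List Int := (10, 2, [1, 2, 3])

def Spec_solution (n : Int) (k : Int) (enemy : List Int) (out : Int) : Prop := out = solution_alt n k enemy
instance (n : Int) (k : Int) (enemy : List Int) (out : Int) : Decidable (Spec_solution n k enemy out) := by unfold Spec_solution; infer_instance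

-- ===== CLAIM (what is proved, stated in full; the proofs are below) =====
def Claim_equal_solution : Prop := ∀ (n : Int) (k : Int) (enemy : List Int), Dom_solution n k enemy → Pre_solution n k enemy → Spec_solution n k enemy (solution n k enemy)

-- ===== LEMMAS AND PROOFS =====

-- insertion sort by pqPut, the sequence A's heap contents run through
def sortI (l : List Int) : List Int := l.foldl (fun h e => pqPut e h) []

theorem pqPut_perm (x : Int) (l : List Int) : (pqPut x l).Perm (x :: l) := by
  induction l with
  | nil => simp [pqPut]
  | cons y ys ih =>
    simp only [pqPut]
    split
    · exact List.Perm.refl _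
    · exact (List.Perm.cons y ih).trans (List.Perm.swap x y ys)

theorem pqPut_sorted (x : Int) (l : List Int) (hl : l.Pairwise (· ≤ ·)) :
    (pqPut x l).Pairwise (· ≤ ·) := by
  induction l with
  | nil => simp [pqPut]
  | cons y ys ih =>
    rcases List.pairwise_cons.mp hl with ⟨hy, hys⟩
    by_cases hxy : x ≤ y
    · simp only [pqPut, if_pos hxy]
      refine List.pairwise_cons.mpr ⟨?_, hl⟩
      intro a ha
      rcases List.mem_cons.mp ha with rfl | h
      · exact hxy
      · exact le_trans hxy (hy a h)
    · simp only [pqPut, if_neg hxy]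
      refine List.pairwise_cons.mpr ⟨?_, ih hys⟩
      intro a ha
      rcases List.mem_cons.mp ((pqPut_perm x ys).mem_iff.mp ha) with rfl | h
      · omega
      · exact hy a h

theorem pqPut_length (x : Int) (l : List Int) : (pqPut x l).length = l.length + 1 := by
  simpa using (pqPut_perm x l).length_eq

theorem pqPut_sum (x : Int) (l : List Int) : (pqPut x l).sum = x + l.sum := by
  simpa using (pqPut_perm x l).sum_eq

theorem pqPut_append_left (x : Int) (l1 l2 : List Int) (h : ∀ y ∈ l1, y < x) :
    pqPut x (l1 ++ l2) = l1 ++ pqPut x l2 := by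
  induction l1 with
  | nil => rfl
  | cons y ys ih =>
    have hy : y < x := h y (by simp)
    simp only [List.cons_append, pqPut, if_neg (by omega : ¬ x ≤ y)]
    rw [ih (fun z hz => h z (by simp [hz]))]

theorem pqPut_append_right (x : Int) (l1 l2 : List Int) (h : ∀ y ∈ l2, x ≤ y) :
    pqPut x (l1 ++ l2) = pqPut x l1 ++ l2 := by
  induction l1 with
  | nil =>
    cases l2 with
    | nil => rfl
    | cons z zs => simp only [List.nil_append, pqPut, if_pos (h z (by simp))]; rfl
  | cons y ys ih =>
    simp only [List.cons_append, pqPut]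
    split
    · rfl
    · rw [ih]; rfl

theorem sortI_perm (l : List Int) : (sortI l).Perm l := by
  suffices H : ∀ (l acc : List Int), (l.foldl (fun h e => pqPut e h) acc).Perm (acc ++ l) by
    simpa using H l []
  intro l
  induction l with
  | nil => simp
  | cons e rest ih =>
    intro acc
    simp only [List.foldl_cons]
    refine (ih (pqPut e acc)).trans ?_
    refine (List.Perm.append_right rest (pqPut_perm e acc)).trans ?_
    simpa using (List.perm_middle (a := e) (l₁ := acc) (l₂ := rest)).symm

theorem sortI_sorted (l : List Int) : (sortI l).Pairwise (· ≤ ·) := by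
  suffices H : ∀ (l acc : List Int), acc.Pairwise (· ≤ ·) →
      (l.foldl (fun h e => pqPut e h) acc).Pairwise (· ≤ ·) by
    exact H l [] (by simp)
  intro l
  induction l with
  | nil => intro acc h; simpa using h
  | cons e rest ih =>
    intro acc h
    exact ih (pqPut e acc) (pqPut_sorted e acc h)

theorem sortI_append (l : List Int) (e : Int) : sortI (l ++ [e]) = pqPut e (sortI l) := by
  simp [sortI]

theorem sortI_length (l : List Int) : (sortI l).length = l.length := (sortI_perm l).length_eq

-- the port of Source B's sorted() agrees with the heap-contents sort
theorem pySorted_eq_sortI (l : List Int) :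
    PySem.List.sorted l (fun x => x) false = sortI l :=
  PySem.List.sorted_id_eq_of_perm_of_pairwise l (sortI l) (sortI_perm l) (sortI_sorted l)

theorem sorted_take_le (l : List Int) (j : Nat) (hj : j < l.length)
    (hs : l.Pairwise (· ≤ ·)) : ∀ y ∈ l.take j, y ≤ l[j] := by
  intro y hy
  rcases List.mem_take_iff_getElem.mp hy with ⟨i, hi, rfl⟩
  exact List.pairwise_iff_getElem.mp hs i j (by omega) hj (by omega)

theorem sorted_drop_ge (l : List Int) (j : Nat) (hj : j < l.length)
    (hs : l.Pairwise (· ≤ ·)) : ∀ y ∈ l.drop j, l[j] ≤ y := by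
  intro y hy
  rcases List.mem_drop_iff_getElem.mp hy with ⟨i, hi, rfl⟩
  rcases Nat.eq_zero_or_pos i with rfl | h
  · simp
  · exact List.pairwise_iff_getElem.mp hs j (j + i) hj (by omega) (by omega)

theorem solGo_cons_cons (n k m : Int) (t : List Int) (ans e : Int) (rest : List Int)
    (hknp : ¬ 0 < k) :
    solGo n k (m :: t) ans (e :: rest)
      = if m < e then (if n ≥ m then solGo (n - m) k (pqPut e t) (ans + 1) rest else ans)
        else (if n ≥ e then solGo (n - e) k (m :: t) (ans + 1) rest else ans) := by
  simp [solGo, hknp]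

-- the bridge invariant: A's loop state after surviving the first p.length rounds
theorem bridge (n k : Int) (hk : 1 ≤ k) :
    ∀ (rest p : List Int),
      solGo (n - ((sortI p).take (p.length - k.toNat)).sum)
            (max (k - p.length) 0)
            ((sortI p).drop (p.length - k.toNat))
            (p.length) rest
        = solAltGo n k (p ++ rest) (p.length) rest.length := by
  intro rest
  induction rest with
  | nil =>
    intro p
    simp [solGo, solAltGo]
  | cons e rest' ih =>
    intro p
    have hκ : (k.toNat : Int) = k := Int.toNat_of_nonneg (by omega)
    have hsplit : p ++ e :: rest' = (p ++ [e]) ++ rest' := by simp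
    have htake : (p ++ e :: rest').take (p.length + 1) = p ++ [e] := by
      rw [hsplit]; exact List.take_left' (by simp)
    have hlen1 : (p ++ [e]).length = p.length + 1 := by simp
    have hcast : ((p.length : Int) + 1) = ((p.length + 1 : Nat) : Int) := by push_cast; ring
    by_cases hpos : (p.length : Int) < k
    · -- phase 1: a slot for an ability remains, k > 0 in A
      have hj : p.length - k.toNat = 0 := by omega
      have hj' : (p ++ [e]).length - k.toNat = 0 := by simp; omega
      have hmax : 0 < max (k - (p.length : Int)) 0 := by omega
      simp only [hj, List.take_zero, List.sum_nil, sub_zero, List.drop_zero, solGo,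
        if_pos hmax]
      have hfeas : feasibleB n k (p ++ e :: rest') (p.length + 1) = true := by
        unfold feasibleB
        rw [if_pos (by push_cast; omega)]
      simp only [List.length_cons, solAltGo]
      rw [if_pos ⟨by simp, hfeas⟩, hsplit]
      have := ih (p ++ [e])
      rw [hj', hlen1, sortI_append] at this
      simp only [List.take_zero, List.sum_nil, sub_zero, List.drop_zero] at this
      have harith : max (k - (p.length : Int)) 0 - 1 = max (k - ((p.length + 1 : Nat) : Int)) 0 := by
        push_cast; omega
      rw [harith, hcast]
      exact this
    · -- phase 2: no slots left, k = 0 in A, heap holds the k largest of p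
      set l := sortI p with hl
      have hlp : l.length = p.length := sortI_length p
      set j := p.length - k.toNat with hjdef
      have hjl : j < l.length := by omega
      have hdropc : l.drop j = l[j] :: l.drop (j + 1) := List.drop_eq_getElem_cons hjl
      have hmax0 : max (k - (p.length : Int)) 0 = 0 := by omega
      have htakes : l.take (j + 1) = l.take j ++ [l[j]] := List.take_succ_eq_append_getElem hjl
      have hsort : PySem.List.sorted ((p ++ e :: rest').take (p.length + 1)) (fun x => x) false
          = pqPut e l := by
        rw [htake, pySorted_eq_sortI, sortI_append, hl]
      have hr : ((((p.length + 1 : Nat) : Int)) - k).toNat = j + 1 := by omega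
      have hfeas : feasibleB n k (p ++ e :: rest') (p.length + 1)
          = decide (((pqPut e l).take (j + 1)).sum ≤ n) := by
        unfold feasibleB
        rw [if_neg (by push_cast; omega), hsort]
        simp only [hr]
      have hj1 : (p ++ [e]).length - k.toNat = j + 1 := by simp; omega
      have hmax1 : max (k - ((p.length + 1 : Nat) : Int)) 0 = 0 := by push_cast; omega
      rw [hmax0, hdropc, solGo_cons_cons _ 0 _ _ _ e rest' (by omega)]
      by_cases hme : l[j] < e
      · -- the new enemy replaces the heap minimum; A pays l[j]
        have hleft : ∀ y ∈ l.take (j + 1), y < e := by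
          intro y hy
          rw [htakes] at hy
          rcases List.mem_append.mp hy with hy | hy
          · exact lt_of_le_of_lt (sorted_take_le l j hjl (hl ▸ sortI_sorted p) y hy) hme
          · simp at hy; omega
        have hput : pqPut e l = l.take (j + 1) ++ pqPut e (l.drop (j + 1)) := by
          conv_lhs => rw [← List.take_append_drop (j + 1) l]
          exact pqPut_append_left e _ _ hleft
        have hptake : (pqPut e l).take (j + 1) = l.take (j + 1) := by
          rw [hput]; exact List.take_left' (by simp [List.length_take]; omega)
        have hpdrop : (pqPut e l).drop (j + 1) = pqPut e (l.drop (j + 1)) := by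
          rw [hput]; exact List.drop_left' (by simp [List.length_take]; omega)
        have hsum : ((pqPut e l).take (j + 1)).sum = (l.take j).sum + l[j] := by
          rw [hptake, htakes, List.sum_append, List.sum_cons, List.sum_nil, add_zero]
        by_cases hn : n - (l.take j).sum ≥ l[j]
        · rw [if_pos hme, if_pos hn]
          simp only [List.length_cons, solAltGo]
          rw [if_pos ⟨by simp, by rw [hfeas, hsum]; simp only [decide_eq_true_eq]; omega⟩,
            hsplit]
          have := ih (p ++ [e])
          rw [hj1, hlen1, hmax1, sortI_append, ← hl, hptake, hpdrop, htakes,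
            List.sum_append, List.sum_cons, List.sum_nil, add_zero] at this
          rw [show n - (l.take j).sum - l[j] = n - ((l.take j).sum + l[j]) from by ring,
            hcast]
          exact this
        · rw [if_pos hme, if_neg hn]
          simp only [List.length_cons, solAltGo]
          rw [if_neg (by
            rintro ⟨-, hb⟩
            rw [hfeas, hsum] at hb
            simp only [decide_eq_true_eq] at hb
            omega)]
      · -- the new enemy is the cheapest; A pays e and keeps the heap
        have hright : ∀ y ∈ l.drop j, e ≤ y := by
          intro y hy
          exact le_trans (by omega) (sorted_drop_ge l j hjl (hl ▸ sortI_sorted p) y hy)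
        have hput : pqPut e l = pqPut e (l.take j) ++ l.drop j := by
          conv_lhs => rw [← List.take_append_drop j l]
          exact pqPut_append_right e _ _ hright
        have hptake : (pqPut e l).take (j + 1) = pqPut e (l.take j) := by
          rw [hput]; exact List.take_left' (by rw [pqPut_length]; simp [List.length_take]; omega)
        have hpdrop : (pqPut e l).drop (j + 1) = l.drop j := by
          rw [hput]; exact List.drop_left' (by rw [pqPut_length]; simp [List.length_take]; omega)
        have hsum : ((pqPut e l).take (j + 1)).sum = e + (l.take j).sum := by
          rw [hptake, pqPut_sum]
        by_cases hn : n - (l.take j).sum ≥ e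
        · rw [if_neg hme, if_pos hn]
          simp only [List.length_cons, solAltGo]
          rw [if_pos ⟨by simp, by rw [hfeas, hsum]; simp only [decide_eq_true_eq]; omega⟩,
            hsplit]
          have := ih (p ++ [e])
          rw [hj1, hlen1, hmax1, sortI_append, ← hl, hptake, hpdrop, pqPut_sum, hdropc] at this
          rw [show n - (l.take j).sum - e = n - (e + (l.take j).sum) from by ring, hcast]
          exact this
        · rw [if_neg hme, if_neg hn]
          simp only [List.length_cons, solAltGo]
          rw [if_neg (by
            rintro ⟨-, hb⟩
            rw [hfeas, hsum] at hb
            simp only [decide_eq_true_eq] at hb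
            omega)]

-- ===== VERDICT (by name: the statement is the Claim_ definition above) =====
theorem solution_spec : Claim_equal_solution := by
  intro n k enemy _ hpre
  unfold Spec_solution solution solution_alt
  rcases hpre with rfl | hk
  · simp [solGo, solAltGo]
  · have h := bridge n k hk enemy []
    simp only [List.length_nil, Nat.zero_sub, List.take_zero, List.sum_nil, sub_zero,
      List.drop_zero, List.nil_append, Nat.cast_zero] at h
    rw [show sortI [] = [] from rfl] at h
    rw [max_eq_left (by omega : (0 : Int) ≤ k)] at h
    exact h
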